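-- pv_equiv track=rewrite | github.com/wanizhou/IETI | 3.Evaluation.py | get_candidate_sentences_ids
-- ===== SOURCE A (Python) =====
-- def get_candidate_sentences_ids(rawinput, rates):
--     sent_ids = []
--     sent_rates = []
--     index = 0
--     for t_i, rawinput_i in enumerate(rawinput):
--         sent_id = []
--         sent_rate = []
--         for i_d, input_d in enumerate(rawinput_i):
--             for i_s, input_s in enumerate(input_d):
--                 if len(input_s) < 4:
--                     continue
--                 sent_id.append(index + i_s)
--                 sent_rate.append(rates[t_i][i_d])
--             index += len(input_d)
--         sent_ids.append(sent_id)
--         sent_rates.append(sent_rate)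
--     return sent_ids, sent_rates
-- ===== SOURCE B (Python) =====
-- def get_candidate_sentences_ids(rawinput, rates):
--     # Pass 1: global starting offset of every document (advances even for empty
--     # or fully filtered documents).
--     offsets = []
--     acc = 0
--     for row in rawinput:
--         orow = []
--         for doc in row:
--             orow.append(acc)
--             acc += len(doc)
--         offsets.append(orow)
--     # Pass 2: pure filtering/collection, no running state.
--     sent_ids = [[off + s
--                  for off, doc in zip(orow, row)
--                  for s, sent in enumerate(doc)
--                  if len(sent) >= 4]
--                 for orow, row in zip(offsets, rawinput)]
--     sent_rates = [[rates[t][d]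
--                    for d, doc in enumerate(row)
--                    for sent in doc
--                    if len(sent) >= 4]
--                   for t, row in enumerate(rawinput)]
--     return sent_ids, sent_rates
-- ===== Notes on version B (the rewrite author's own statement) =====
-- stated objective: alternative
-- what changed: A's single triple-nested loop threading a running global index through accumulator state is replaced by two stateless passes: a prefix-sum offset table per document, then pure zip/enumerate comprehensions that filter and collect with no running state.
import Mathlib
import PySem

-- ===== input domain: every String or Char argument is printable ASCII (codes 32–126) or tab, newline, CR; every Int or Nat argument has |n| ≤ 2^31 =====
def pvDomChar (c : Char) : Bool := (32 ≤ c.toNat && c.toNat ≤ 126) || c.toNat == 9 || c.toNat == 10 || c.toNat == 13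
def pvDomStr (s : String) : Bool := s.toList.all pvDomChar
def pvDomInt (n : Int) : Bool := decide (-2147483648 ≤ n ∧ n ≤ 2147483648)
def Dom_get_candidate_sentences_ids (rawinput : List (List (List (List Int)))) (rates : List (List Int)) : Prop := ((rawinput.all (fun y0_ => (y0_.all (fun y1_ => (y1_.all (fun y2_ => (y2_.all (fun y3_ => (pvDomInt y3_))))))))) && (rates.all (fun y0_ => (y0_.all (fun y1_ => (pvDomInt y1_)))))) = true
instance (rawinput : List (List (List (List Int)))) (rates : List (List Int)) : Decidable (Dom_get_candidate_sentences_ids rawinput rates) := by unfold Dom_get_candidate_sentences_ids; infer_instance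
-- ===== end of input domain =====

-- B splits A's single triple-nested loop with a running global index into two stateless-collection
-- passes: a prefix-sum offset table first, then pure zip/enumerate comprehensions (objective: alternative).

-- ===== PORT A =====
-- Literal transliteration of A: one pass with accumulator state
-- (sent_ids, sent_rates, index); rates[t_i][i_d] is pyGetD, in range under Pre_.
def get_candidate_sentences_ids (rawinput : List (List (List (List Int)))) (rates : List (List Int)) : List (List Int) × List (List Int) :=
  let st := (PySem.List.enumerate rawinput 0).foldl
    (fun (st : List (List Int) × List (List Int) × Int) tp =>
      let inner := (PySem.List.enumerate tp.2 0).foldl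
        (fun (st2 : List Int × List Int × Int) dp =>
          let st3 := (PySem.List.enumerate dp.2 0).foldl
            (fun (st4 : List Int × List Int) sp =>
              if sp.2.length < 4 then st4
              else (st4.1 ++ [st2.2.2 + sp.1],
                    st4.2 ++ [PySem.List.pyGetD (PySem.List.pyGetD rates tp.1 []) dp.1 0]))
            (st2.1, st2.2.1)
          (st3.1, st3.2, st2.2.2 + (dp.2.length : Int)))
        ([], [], st.2.2)
      (st.1 ++ [inner.1], st.2.1 ++ [inner.2.1], inner.2.2))
    ([], [], 0)
  (st.1, st.2.1)

-- ===== PORT B =====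
-- B pass 1: the offset table (orow append + acc advance per document).
def pvAltOffsets (rawinput : List (List (List (List Int)))) : List (List Int) × Int :=
  rawinput.foldl
    (fun (st : List (List Int) × Int) row =>
      let inner := row.foldl
        (fun (st2 : List Int × Int) doc => (st2.1 ++ [st2.2], st2.2 + (doc.length : Int)))
        ([], st.2)
      (st.1 ++ [inner.1], inner.2))
    ([], 0)

def get_candidate_sentences_ids_alt (rawinput : List (List (List (List Int)))) (rates : List (List Int)) : List (List Int) × List (List Int) :=
  let offsets := (pvAltOffsets rawinput).1
  let sent_ids := (offsets.zip rawinput).map (fun p =>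
    (p.1.zip p.2).flatMap (fun q =>
      (PySem.List.enumerate q.2 0).filterMap (fun sp =>
        if 4 ≤ sp.2.length then some (q.1 + sp.1) else none)))
  let sent_rates := (PySem.List.enumerate rawinput 0).map (fun tp =>
    (PySem.List.enumerate tp.2 0).flatMap (fun dp =>
      dp.2.filterMap (fun sent =>
        if 4 ≤ sent.length then some (PySem.List.pyGetD (PySem.List.pyGetD rates tp.1 []) dp.1 0) else none)))
  (sent_ids, sent_rates)

-- ===== PRECONDITION & SPEC =====
-- Pre_ excludes exactly the inputs on which A raises IndexError: rates[t][d] is looked up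
-- whenever document (t,d) contains a sentence of length ≥ 4, so those positions must exist.
def Pre_get_candidate_sentences_ids (rawinput : List (List (List (List Int)))) (rates : List (List Int)) : Prop :=
  ∀ t : Nat, t < rawinput.length → ∀ d : Nat, d < (rawinput.getD t []).length →
    ((rawinput.getD t []).getD d []).any (fun s => 4 ≤ s.length) = true →
      t < rates.length ∧ d < (rates.getD t []).length
instance (rawinput : List (List (List (List Int)))) (rates : List (List Int)) : Decidable (Pre_get_candidate_sentences_ids rawinput rates) := by unfold Pre_get_candidate_sentences_ids; infer_instance
def pvWitness_get_candidate_sentences_ids : List (List (List (List Int))) × List (List Int) :=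
  ([[[[1, 2, 3, 4], [5]], []], [[[6, 7, 8, 9, 10]]]], [[7, 0], [3]])

def Spec_get_candidate_sentences_ids (rawinput : List (List (List (List Int)))) (rates : List (List Int)) (out : List (List Int) × List (List Int)) : Prop := out = get_candidate_sentences_ids_alt rawinput rates
instance (rawinput : List (List (List (List Int)))) (rates : List (List Int)) (out : List (List Int) × List (List Int)) : Decidable (Spec_get_candidate_sentences_ids rawinput rates out) := by unfold Spec_get_candidate_sentences_ids; infer_instance

-- ===== CLAIM (what is proved, stated in full; the proofs are below) =====
def Claim_equal_get_candidate_sentences_ids : Prop := ∀ (rawinput : List (List (List (List Int)))) (rates : List (List Int)), Dom_get_candidate_sentences_ids rawinput rates → Pre_get_candidate_sentences_ids rawinput rates → Spec_get_candidate_sentences_ids rawinput rates (get_candidate_sentences_ids rawinput rates)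

-- ===== LEMMAS AND PROOFS =====

-- Common abstract description: kept ids / rates of one document.
def pvKeptIds (base : Int) (doc : List (List Int)) : List Int :=
  (PySem.List.enumerate doc 0).filterMap (fun sp => if 4 ≤ sp.2.length then some (base + sp.1) else none)

def pvKeptRates (r : Int) (doc : List (List Int)) : List Int :=
  doc.filterMap (fun sent => if 4 ≤ sent.length then some r else none)

def pvRowIds (idx : Int) : List (List (List Int)) → List Int
  | [] => []
  | doc :: row => pvKeptIds idx doc ++ pvRowIds (idx + doc.length) row

def pvRowRates (rates : List (List Int)) (t d : Int) : List (List (List Int)) → List Int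
  | [] => []
  | doc :: row => pvKeptRates (PySem.List.pyGetD (PySem.List.pyGetD rates t []) d 0) doc
      ++ pvRowRates rates t (d + 1) row

def pvRowLen (row : List (List (List Int))) : Int := (row.map (fun doc => (doc.length : Int))).sum

def pvAllIds (idx : Int) : List (List (List (List Int))) → List (List Int)
  | [] => []
  | row :: rest => pvRowIds idx row :: pvAllIds (idx + pvRowLen row) rest

def pvAllRates (rates : List (List Int)) (t : Int) : List (List (List (List Int))) → List (List Int)
  | [] => []
  | row :: rest => pvRowRates rates t 0 row :: pvAllRates rates (t + 1) rest

def pvORow (acc : Int) : List (List (List Int)) → List Int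
  | [] => []
  | doc :: row => acc :: pvORow (acc + doc.length) row

def pvOffsets (acc : Int) : List (List (List (List Int))) → List (List Int)
  | [] => []
  | row :: rest => pvORow acc row :: pvOffsets (acc + pvRowLen row) rest

-- ---- A-side characterisation ----

theorem pvA_inner (doc : List (List Int)) (rate idx : Int) :
    ∀ (j : Int) (s0 r0 : List Int),
    (PySem.List.enumerate doc j).foldl
      (fun (st4 : List Int × List Int) sp =>
        if sp.2.length < 4 then st4 else (st4.1 ++ [idx + sp.1], st4.2 ++ [rate]))
      (s0, r0)
    = (s0 ++ (PySem.List.enumerate doc j).filterMap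
          (fun sp => if 4 ≤ sp.2.length then some (idx + sp.1) else none),
       r0 ++ pvKeptRates rate doc) := by
  induction doc with
  | nil => intro j s0 r0; simp [PySem.List.enumerate, pvKeptRates]
  | cons sent rest ih =>
    intro j s0 r0
    simp only [PySem.List.enumerate_cons, List.foldl_cons, List.filterMap_cons, pvKeptRates,
      List.filterMap]
    by_cases h : 4 ≤ sent.length
    · have h' : ¬ sent.length < 4 := by omega
      simp only [if_neg h', if_pos h]
      rw [ih (j + 1)]
      simp [pvKeptRates, List.append_assoc]
    · have h' : sent.length < 4 := by omega
      simp only [if_pos h', if_neg h]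
      rw [ih (j + 1)]
      simp [pvKeptRates]

theorem pvA_mid (rates : List (List Int)) (t : Int) (row : List (List (List Int))) :
    ∀ (d idx : Int) (s0 r0 : List Int),
    (PySem.List.enumerate row d).foldl
      (fun (st2 : List Int × List Int × Int) dp =>
        let st3 := (PySem.List.enumerate dp.2 0).foldl
          (fun (st4 : List Int × List Int) sp =>
            if sp.2.length < 4 then st4
            else (st4.1 ++ [st2.2.2 + sp.1],
                  st4.2 ++ [PySem.List.pyGetD (PySem.List.pyGetD rates t []) dp.1 0]))
          (st2.1, st2.2.1)
        (st3.1, st3.2, st2.2.2 + (dp.2.length : Int)))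
      (s0, r0, idx)
    = (s0 ++ pvRowIds idx row, r0 ++ pvRowRates rates t d row, idx + pvRowLen row) := by
  induction row with
  | nil => intro d idx s0 r0; simp [PySem.List.enumerate, pvRowIds, pvRowRates, pvRowLen]
  | cons doc rest ih =>
    intro d idx s0 r0
    simp only [PySem.List.enumerate_cons, List.foldl_cons]
    rw [pvA_inner doc _ idx 0 s0 r0]
    rw [ih (d + 1) (idx + doc.length)]
    simp [pvRowIds, pvRowRates, pvRowLen, pvKeptIds, List.append_assoc, add_assoc, List.sum_cons]

theorem pvA_outer (rates : List (List Int)) (rawinput : List (List (List (List Int)))) :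
    ∀ (t idx : Int) (S R : List (List Int)),
    (PySem.List.enumerate rawinput t).foldl
      (fun (st : List (List Int) × List (List Int) × Int) tp =>
        let inner := (PySem.List.enumerate tp.2 0).foldl
          (fun (st2 : List Int × List Int × Int) dp =>
            let st3 := (PySem.List.enumerate dp.2 0).foldl
              (fun (st4 : List Int × List Int) sp =>
                if sp.2.length < 4 then st4
                else (st4.1 ++ [st2.2.2 + sp.1],
                      st4.2 ++ [PySem.List.pyGetD (PySem.List.pyGetD rates tp.1 []) dp.1 0]))
              (st2.1, st2.2.1)
            (st3.1, st3.2, st2.2.2 + (dp.2.length : Int)))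
          ([], [], st.2.2)
        (st.1 ++ [inner.1], st.2.1 ++ [inner.2.1], inner.2.2))
      (S, R, idx)
    = (S ++ pvAllIds idx rawinput, R ++ pvAllRates rates t rawinput, idx + (rawinput.map pvRowLen).sum) := by
  induction rawinput with
  | nil => intro t idx S R; simp [PySem.List.enumerate, pvAllIds, pvAllRates]
  | cons row rest ih =>
    intro t idx S R
    simp only [PySem.List.enumerate_cons, List.foldl_cons]
    rw [pvA_mid rates t row 0 idx [] []]
    simp only [List.nil_append]
    rw [ih (t + 1) (idx + pvRowLen row)]
    simp [pvAllIds, pvAllRates, List.append_assoc, add_assoc, List.sum_cons]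

theorem pvA_eq (rawinput : List (List (List (List Int)))) (rates : List (List Int)) :
    get_candidate_sentences_ids rawinput rates = (pvAllIds 0 rawinput, pvAllRates rates 0 rawinput) := by
  unfold get_candidate_sentences_ids
  rw [pvA_outer rates rawinput 0 0 [] []]
  simp

-- ---- B-side characterisation ----

theorem pvB_offsets_inner (row : List (List (List Int))) :
    ∀ (acc : Int) (o0 : List Int),
    row.foldl (fun (st2 : List Int × Int) doc => (st2.1 ++ [st2.2], st2.2 + (doc.length : Int))) (o0, acc)
    = (o0 ++ pvORow acc row, acc + pvRowLen row) := by
  induction row with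
  | nil => intro acc o0; simp [pvORow, pvRowLen]
  | cons doc rest ih =>
    intro acc o0
    simp only [List.foldl_cons]
    rw [ih (acc + doc.length)]
    simp [pvORow, pvRowLen, List.append_assoc, add_assoc, List.sum_cons]

theorem pvB_offsets (rawinput : List (List (List (List Int)))) :
    ∀ (acc : Int) (O : List (List Int)),
    rawinput.foldl
      (fun (st : List (List Int) × Int) row =>
        let inner := row.foldl
          (fun (st2 : List Int × Int) doc => (st2.1 ++ [st2.2], st2.2 + (doc.length : Int)))
          ([], st.2)
        (st.1 ++ [inner.1], inner.2))
      (O, acc)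
    = (O ++ pvOffsets acc rawinput, acc + (rawinput.map pvRowLen).sum) := by
  induction rawinput with
  | nil => intro acc O; simp [pvOffsets]
  | cons row rest ih =>
    intro acc O
    simp only [List.foldl_cons]
    rw [pvB_offsets_inner row acc []]
    simp only [List.nil_append]
    rw [ih (acc + pvRowLen row)]
    simp [pvOffsets, List.append_assoc, add_assoc, List.sum_cons]

theorem pvB_row_ids (row : List (List (List Int))) :
    ∀ (acc : Int),
    ((pvORow acc row).zip row).flatMap (fun q =>
      (PySem.List.enumerate q.2 0).filterMap (fun sp =>
        if 4 ≤ sp.2.length then some (q.1 + sp.1) else none))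
    = pvRowIds acc row := by
  induction row with
  | nil => intro acc; simp [pvORow, pvRowIds]
  | cons doc rest ih =>
    intro acc
    simp only [pvORow, pvRowIds, List.zip_cons_cons, List.flatMap_cons]
    rw [ih (acc + doc.length)]
    rfl

theorem pvB_ids (rawinput : List (List (List (List Int)))) :
    ∀ (acc : Int),
    ((pvOffsets acc rawinput).zip rawinput).map (fun p =>
      (p.1.zip p.2).flatMap (fun q =>
        (PySem.List.enumerate q.2 0).filterMap (fun sp =>
          if 4 ≤ sp.2.length then some (q.1 + sp.1) else none)))
    = pvAllIds acc rawinput := by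
  induction rawinput with
  | nil => intro acc; simp [pvOffsets, pvAllIds]
  | cons row rest ih =>
    intro acc
    simp only [pvOffsets, pvAllIds, List.zip_cons_cons, List.map_cons]
    rw [ih (acc + pvRowLen row), pvB_row_ids row acc]

theorem pvB_row_rates (rates : List (List Int)) (t : Int) (row : List (List (List Int))) :
    ∀ (d : Int),
    (PySem.List.enumerate row d).flatMap (fun dp =>
      dp.2.filterMap (fun sent =>
        if 4 ≤ sent.length then some (PySem.List.pyGetD (PySem.List.pyGetD rates t []) dp.1 0) else none))
    = pvRowRates rates t d row := by
  induction row with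
  | nil => intro d; simp [PySem.List.enumerate, pvRowRates]
  | cons doc rest ih =>
    intro d
    simp only [PySem.List.enumerate_cons, List.flatMap_cons]
    rw [ih (d + 1)]
    rfl

theorem pvB_rates (rates : List (List Int)) (rawinput : List (List (List (List Int)))) :
    ∀ (t : Int),
    (PySem.List.enumerate rawinput t).map (fun tp =>
      (PySem.List.enumerate tp.2 0).flatMap (fun dp =>
        dp.2.filterMap (fun sent =>
          if 4 ≤ sent.length then some (PySem.List.pyGetD (PySem.List.pyGetD rates tp.1 []) dp.1 0) else none)))
    = pvAllRates rates t rawinput := by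
  induction rawinput with
  | nil => intro t; simp [PySem.List.enumerate, pvAllRates]
  | cons row rest ih =>
    intro t
    simp only [PySem.List.enumerate_cons, List.map_cons]
    rw [ih (t + 1), pvB_row_rates rates t row 0]
    rfl

theorem pvB_eq (rawinput : List (List (List (List Int)))) (rates : List (List Int)) :
    get_candidate_sentences_ids_alt rawinput rates = (pvAllIds 0 rawinput, pvAllRates rates 0 rawinput) := by
  unfold get_candidate_sentences_ids_alt pvAltOffsets
  rw [pvB_offsets rawinput 0 []]
  simp only [List.nil_append]
  rw [pvB_ids rawinput 0, pvB_rates rates rawinput 0]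

-- ===== VERDICT (by name: the statement is the Claim_ definition above) =====
theorem get_candidate_sentences_ids_spec : Claim_equal_get_candidate_sentences_ids := by
  intro rawinput rates _dom _pre
  unfold Spec_get_candidate_sentences_ids
  rw [pvA_eq, pvB_eq]
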